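-- pv_equiv track=rewrite | github.com/ssy80/42school_python | python01/ex01/array2D.py | is_2d_list
-- ===== SOURCE A (Python) =====
-- def is_2d_list(lst):
--     """
--     Check is valid list, return False if not.
--     length must not be empty, must be a list instance, every list in the main list is also a list,
--     all inner list must not be empty
--     """
--     if not isinstance(lst, list):
--         return False
--
--     if len(lst) == 0:
--         return False
--
--     if not all(isinstance(x, list) for x in lst):
--         return False
--
--     if any(len(x)==0 for x in lst):
--         return False
--
--     first = len(lst[0])
--     if not all(len(x)==first for x in lst):
--         return False
--
--     return True
-- ===== SOURCE B (Python) =====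
-- def is_2d_list(lst):
--     if not isinstance(lst, list) or len(lst) == 0:
--         return False
--
--     def ok_row(x):
--         return isinstance(x, list) and len(x) > 0
--
--     def go(rows):
--         # rows is nonempty
--         if len(rows) == 1:
--             return ok_row(rows[0])
--         return ok_row(rows[0]) and len(rows[0]) == len(rows[1]) and go(rows[1:])
--
--     return go(lst)
-- ===== Notes on version B (the rewrite author's own statement) =====
-- stated objective: alternative
-- what changed: Rectangularity is decided by structural recursion comparing each adjacent pair of rows (correct by transitivity of equality), instead of A's staged all/any passes that compare every row to the first one's length.
import Mathlib
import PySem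

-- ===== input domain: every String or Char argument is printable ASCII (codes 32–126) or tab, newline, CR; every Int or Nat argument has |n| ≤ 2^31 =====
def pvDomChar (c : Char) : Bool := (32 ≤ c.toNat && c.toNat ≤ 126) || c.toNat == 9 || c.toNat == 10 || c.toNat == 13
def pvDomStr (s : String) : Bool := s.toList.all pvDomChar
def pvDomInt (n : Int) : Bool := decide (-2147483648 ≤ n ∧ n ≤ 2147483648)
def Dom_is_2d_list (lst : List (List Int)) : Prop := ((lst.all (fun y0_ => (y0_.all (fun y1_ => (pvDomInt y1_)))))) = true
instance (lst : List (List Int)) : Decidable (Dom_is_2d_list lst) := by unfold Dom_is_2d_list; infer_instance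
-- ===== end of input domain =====

-- B decides rectangularity by structural recursion over adjacent row pairs (correct by transitivity of equality), instead of A's staged all/any passes comparing every row to the first row's length; same cost, different decomposition.

-- ===== PORT A =====
-- literal transliteration: the isinstance checks are trivially true at type List (List Int)
def is_2d_list (lst : List (List Int)) : Bool :=
  if lst.length == 0 then false
  else if !(lst.all (fun _ => true)) then false          -- all(isinstance(x, list) …)
  else if lst.any (fun x => x.length == 0) then false
  else
    let first := ((PySem.List.pyGet? lst 0).getD []).length   -- lst[0]; lst nonempty here
    if !(lst.all (fun x => x.length == first)) then false
    else true

-- ===== PORT B =====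
def okRow (x : List Int) : Bool := decide (0 < x.length)   -- isinstance(x, list) and len(x) > 0

-- Source B's go: Python never calls it on []; the [] case is an unreachable default
def is2dGo : List (List Int) → Bool
  | [] => true
  | [x] => okRow x
  | x :: y :: rest => okRow x && x.length == y.length && is2dGo (y :: rest)

def is_2d_list_alt (lst : List (List Int)) : Bool :=
  if lst.length == 0 then false
  else is2dGo lst

-- ===== PRECONDITION & SPEC =====
def Spec_is_2d_list (lst : List (List Int)) (out : Bool) : Prop := out = is_2d_list_alt lst
instance (lst : List (List Int)) (out : Bool) : Decidable (Spec_is_2d_list lst out) := by unfold Spec_is_2d_list; infer_instance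

-- ===== CLAIM (what is proved, stated in full; the proofs are below) =====
def Claim_equal_is_2d_list : Prop := ∀ (lst : List (List Int)), Dom_is_2d_list lst → Spec_is_2d_list lst (is_2d_list lst)

-- ===== LEMMAS AND PROOFS =====

-- the adjacent-pair recursion equals "first row nonempty, and every later row nonempty with the first row's length"
theorem is2dGo_eq (x : List Int) (rest : List (List Int)) :
    is2dGo (x :: rest) =
      (!(x.length == 0) && rest.all (fun y => !(y.length == 0) && y.length == x.length)) := by
  induction rest generalizing x with
  | nil =>
    rw [Bool.eq_iff_iff]
    simp only [is2dGo, okRow, List.all_nil, Bool.and_true, Bool.not_eq_true',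
      beq_eq_false_iff_ne, ne_eq, decide_eq_true_eq]
    omega
  | cons y t ih =>
    rw [is2dGo, ih y, Bool.eq_iff_iff]
    simp only [okRow, Bool.and_eq_true, Bool.not_eq_true', beq_iff_eq, decide_eq_true_eq,
      List.all_cons, List.all_eq_true, beq_eq_false_iff_ne, ne_eq]
    constructor
    · rintro ⟨⟨h1, h2⟩, h3, h4⟩
      exact ⟨by omega, ⟨h3, h2.symm⟩, fun z hz => ⟨(h4 z hz).1, (h4 z hz).2.trans h2.symm⟩⟩
    · rintro ⟨h1, ⟨h2, h3⟩, h4⟩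
      exact ⟨⟨by omega, h3.symm⟩, h2, fun z hz => ⟨(h4 z hz).1, (h4 z hz).2.trans h3.symm⟩⟩

-- ===== VERDICT (by name: the statement is the Claim_ definition above) =====
theorem is_2d_list_spec : Claim_equal_is_2d_list := by
  intro lst _
  unfold Spec_is_2d_list is_2d_list is_2d_list_alt
  cases lst with
  | nil => simp
  | cons x rest =>
    rw [is2dGo_eq, Bool.eq_iff_iff]
    simp
    constructor
    · rintro ⟨⟨h1, h2⟩, h3⟩
      exact ⟨h1, fun z hz => ⟨fun e => h2 (e ▸ hz), h3 z hz⟩⟩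
    · rintro ⟨h1, h2⟩
      exact ⟨⟨h1, fun e => (h2 [] e).1 rfl⟩, fun z hz => (h2 z hz).2⟩
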